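-- pv_equiv track=rewrite | github.com/DidierStevens/DidierStevensSuite | defuzzer.py | MostPrevalent
-- ===== SOURCE A (Python) =====
-- def MostPrevalent(dChars):
--     maximumChar = None
--     maximumValue = 0
--     maximumCount = 0
--     for key, value in dChars.items():
--         if value > maximumValue:
--             maximumValue = value
--             maximumCount = 1
--             maximumChar = key
--         elif value == maximumValue:
--             maximumCount += 1
--     if maximumCount == 1:
--         return maximumChar
--     else:
--         return None
-- ===== SOURCE B (Python) =====
-- def MostPrevalent(dChars):
--     if not dChars:
--         return None
--     maxval = max(dChars.values())
--     if maxval <= 0: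
--         return None
--     winners = [key for key, value in dChars.items() if value == maxval]
--     if len(winners) == 1:
--         return winners[0]
--     return None
-- ===== Notes on version B (the rewrite author's own statement) =====
-- stated objective: simpler
-- what changed: A's single streaming pass maintaining (char, value, count) state is replaced by a two-pass decomposition: compute max(values) once, return None if the dict is empty or the max is <= 0 (A's 0-initialized maximum never selects such keys), then collect the keys attaining the max and return the key iff it is unique.
import Mathlib
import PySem

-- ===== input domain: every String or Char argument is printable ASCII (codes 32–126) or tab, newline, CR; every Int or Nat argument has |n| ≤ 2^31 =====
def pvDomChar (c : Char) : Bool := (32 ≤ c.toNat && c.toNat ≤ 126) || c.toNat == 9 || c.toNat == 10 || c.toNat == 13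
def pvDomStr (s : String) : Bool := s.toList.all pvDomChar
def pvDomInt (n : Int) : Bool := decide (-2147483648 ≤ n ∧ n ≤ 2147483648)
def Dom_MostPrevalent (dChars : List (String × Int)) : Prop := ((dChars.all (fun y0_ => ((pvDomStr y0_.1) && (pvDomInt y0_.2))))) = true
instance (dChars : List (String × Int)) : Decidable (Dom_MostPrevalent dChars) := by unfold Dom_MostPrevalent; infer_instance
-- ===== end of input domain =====

-- B replaces A's single streaming pass by a two-pass max-then-tally decomposition (simpler; same O(n) cost).

-- ===== PORT A =====
-- state: (maximumChar, maximumValue, maximumCount)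
def MostPrevalent (dChars : List (String × Int)) : Option String :=
  let s := dChars.foldl
    (fun (st : Option String × Int × Int) kv =>
      if kv.2 > st.2.1 then (some kv.1, kv.2, 1)
      else if kv.2 == st.2.1 then (st.1, st.2.1, st.2.2 + 1)
      else st)
    (none, 0, 0)
  if s.2.2 == 1 then s.1 else none

-- ===== PORT B =====
def MostPrevalent_alt (dChars : List (String × Int)) : Option String :=
  if dChars.isEmpty then none
  else
    match PySem.List.max? (dChars.map Prod.snd) (fun v => v) with
    | none => none
    | some maxval =>
      if maxval ≤ 0 then none
      else
        let winners := (dChars.filter (fun kv => kv.2 == maxval)).map Prod.fst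
        if winners.length == 1 then winners.head? else none

-- ===== PRECONDITION & SPEC =====
def Spec_MostPrevalent (dChars : List (String × Int)) (out : Option String) : Prop := out = MostPrevalent_alt dChars
instance (dChars : List (String × Int)) (out : Option String) : Decidable (Spec_MostPrevalent dChars out) := by unfold Spec_MostPrevalent; infer_instance

-- ===== CLAIM (what is proved, stated in full; the proofs are below) =====
def Claim_equal_MostPrevalent : Prop := ∀ (dChars : List (String × Int)), Dom_MostPrevalent dChars → Spec_MostPrevalent dChars (MostPrevalent dChars)

-- ===== LEMMAS AND PROOFS =====

-- number of pairs in l whose value is v, as an Int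
def cntEq (l : List (String × Int)) (v : Int) : Int := ((l.filter (fun kv => kv.2 == v)).length : Int)

lemma foldl_max_max (l : List Int) (a b : Int) :
    l.foldl max (max a b) = max a (l.foldl max b) := by
  induction l generalizing a b with
  | nil => simp
  | cons x t ih =>
      simp only [List.foldl_cons]
      rw [max_assoc, ih]

lemma le_foldl_max' (l : List Int) (b : Int) : b ≤ l.foldl max b := by
  induction l generalizing b with
  | nil => simp
  | cons x t ih => exact le_trans (le_max_left b x) (ih (max b x))

-- characterization of A's fold from an arbitrary state
lemma foldA (l : List (String × Int)) (mc : Option String) (mv cnt : Int) :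
    l.foldl
      (fun (st : Option String × Int × Int) kv =>
        if kv.2 > st.2.1 then (some kv.1, kv.2, 1)
        else if kv.2 == st.2.1 then (st.1, st.2.1, st.2.2 + 1)
        else st)
      (mc, mv, cnt) =
    (let M := (l.map Prod.snd).foldl max mv
     (if M = mv then mc else (l.find? (fun kv => kv.2 == M)).map Prod.fst,
      M,
      if M = mv then cnt + cntEq l mv else cntEq l M)) := by
  induction l generalizing mc mv cnt with
  | nil => simp [cntEq]
  | cons kv t ih =>
      obtain ⟨k, v⟩ := kv
      simp only [List.foldl_cons, List.map_cons]
      have hMle : ∀ b : Int, b ≤ (t.map Prod.snd).foldl max b := fun b => le_foldl_max' _ b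
      by_cases hgt : v > mv
      · simp only [if_pos hgt, ih]
        have hmax : max mv v = v := max_eq_right (le_of_lt hgt)
        simp only [hmax]
        have hge := hMle v
        by_cases hMv : (t.map Prod.snd).foldl max v = v
        · have hMmv : ¬ (t.map Prod.snd).foldl max v = mv := by omega
          have hne : ¬ v = mv := by omega
          simp [hMv, cntEq, hne]
          ring
        · have hMmv : ¬ (t.map Prod.snd).foldl max v = mv := by omega
          have hvM : (v == (t.map Prod.snd).foldl max v) = false := by
            simp only [beq_eq_false_iff_ne, ne_eq]; omega
          simp [hMmv, hMv, cntEq, hvM]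
      · simp only [if_neg hgt]
        have hle : v ≤ mv := not_lt.mp hgt
        have hmax : max mv v = mv := max_eq_left hle
        have hge := hMle mv
        by_cases heq : v = mv
        · have hbeq : (v == mv) = true := by simp [heq]
          simp only [hbeq, if_true, ih, hmax]
          by_cases hMmv : (t.map Prod.snd).foldl max mv = mv
          · have hvM : (v == (t.map Prod.snd).foldl max mv) = true := by simp [heq, hMmv]
            simp [hMmv, cntEq, heq]
            ring
          · have hvM : (v == (t.map Prod.snd).foldl max mv) = false := by
              simp only [beq_eq_false_iff_ne, ne_eq]; omega
            simp [hMmv, cntEq, hvM]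
        · have hbeq : (v == mv) = false := by simp [heq]
          simp only [hbeq, Bool.false_eq_true, if_false, ih, hmax]
          by_cases hMmv : (t.map Prod.snd).foldl max mv = mv
          · have hvM : (v == (t.map Prod.snd).foldl max mv) = false := by
              simp [hMmv, heq]
            simp [hMmv, cntEq, heq]
          · have hvM : (v == (t.map Prod.snd).foldl max mv) = false := by
              simp only [beq_eq_false_iff_ne, ne_eq]; omega
            simp [hMmv, cntEq, hvM]

lemma head?_filter_eq_find? {α : Type} (p : α → Bool) (l : List α) :
    (l.filter p).head? = l.find? p := by
  induction l with
  | nil => rfl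
  | cons x t ih =>
      by_cases h : p x = true
      · simp [h]
      · simp only [List.filter_cons, List.find?_cons]
        rw [if_neg (by simp [h]), ih]
        simp [h]

-- ===== VERDICT (by name: the statement is the Claim_ definition above) =====
theorem MostPrevalent_spec : Claim_equal_MostPrevalent := by
  intro dChars _
  unfold Spec_MostPrevalent MostPrevalent MostPrevalent_alt
  cases dChars with
  | nil => simp
  | cons kv t =>
      obtain ⟨k, v⟩ := kv
      rw [foldA]
      simp only [List.map_cons, List.isEmpty_cons, Bool.false_eq_true, if_false,
        PySem.List.max?_id_cons, List.foldl_cons]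
      set m := (t.map Prod.snd).foldl max v with hmdef
      have hM : ((t.map Prod.snd)).foldl max (max 0 v) = max 0 m := by
        rw [foldl_max_max]
      simp only [hM]
      by_cases hm : m ≤ 0
      · -- maxval ≤ 0 : both return none (A's char is still none since M = 0)
        have h0 : max 0 m = 0 := max_eq_left hm
        simp [h0, if_pos hm]
      · have hpos : max 0 m = m := max_eq_right (le_of_lt (not_le.mp hm))
        have hne : m ≠ 0 := by omega
        simp only [hpos, if_neg hm, if_neg hne]
        have hcnt : cntEq ((k, v) :: t) m =
            ((((k, v) :: t).filter (fun kv => kv.2 == m)).map Prod.fst).length := by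
          simp [cntEq]
        rw [hcnt]
        set w := (((k, v) :: t).filter (fun kv => kv.2 == m)).map Prod.fst with hw
        by_cases hlen : w.length = 1
        · simp only [hlen, Int.natCast_one, beq_self_eq_true, if_true]
          rw [hw, List.head?_map, head?_filter_eq_find?]
        · have h1 : ((w.length : Int) == 1) = false := by
            simp; omega
          have h2 : (w.length == 1) = false := by simp [hlen]
          simp [h1, h2]
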